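-- pv_equiv track=rewrite | github.com/Los-Maestros/Proyecto0 | task1.py | construir_parametros
-- ===== SOURCE A (Python) =====
-- def construir_parametros(lista):
--     r = []
--     c = 0
--     while lista[c] != ')':
--         if lista[c] != ',':
--             r.append(lista[c])
--         c += 1
--     return r,c
-- ===== SOURCE B (Python) =====
-- def construir_parametros(lista):
--     c = 0
--     while lista[c] != ')':
--         c += 1
--     r = [x for x in lista[:c] if x != ',']
--     return r, c
-- ===== Notes on version B (the rewrite author's own statement) =====
-- stated objective: simpler
-- what changed: Splits A's fused scan-and-filter loop into two phases: a bare index scan that only locates the first ')' and a single filtered comprehension over the prefix before it.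
import Mathlib
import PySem

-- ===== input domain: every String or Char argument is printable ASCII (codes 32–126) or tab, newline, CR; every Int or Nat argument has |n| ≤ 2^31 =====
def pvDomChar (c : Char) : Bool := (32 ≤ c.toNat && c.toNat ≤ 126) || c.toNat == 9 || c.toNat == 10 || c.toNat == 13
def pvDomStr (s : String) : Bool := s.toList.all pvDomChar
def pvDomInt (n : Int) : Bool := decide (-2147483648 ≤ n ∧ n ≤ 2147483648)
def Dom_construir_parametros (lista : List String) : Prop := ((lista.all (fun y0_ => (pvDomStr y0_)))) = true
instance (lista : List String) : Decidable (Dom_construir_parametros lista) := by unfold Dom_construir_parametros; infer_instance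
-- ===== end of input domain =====

-- B splits A's fused scan-and-filter loop into two phases: find the ')' index, then filter the prefix (objective: simpler).

-- ===== PORT A =====
-- A's while-loop walks index c through lista, appending every non-',' entry until lista[c] = ')'.
-- Ported as structural recursion over the remaining list (the index walk); on a list without ')'
-- Python raises IndexError, which Pre_ excludes, and the port returns ([], 0) there.
def pvALoop : List String → List String × Int
  | [] => ([], 0)
  | x :: xs =>
    if x = ")" then ([], 0)
    else
      let (r, c) := pvALoop xs
      (if x ≠ "," then x :: r else r, c + 1)

def construir_parametros (lista : List String) : List String × Int := pvALoop lista

-- ===== PORT B =====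
-- B phase 1: bare index scan for the first ')' (same IndexError behaviour in Python).
def pvFindClose : List String → Int
  | [] => 0
  | x :: xs => if x = ")" then 0 else pvFindClose xs + 1

-- B phase 2: lista[:c] filtered of ','.
def construir_parametros_alt (lista : List String) : List String × Int :=
  let c := pvFindClose lista
  ((lista.take c.toNat).filter (fun x => x ≠ ","), c)

-- ===== PRECONDITION & SPEC =====
-- Pre_ excludes lists without ')', on which Python A raises IndexError (B raises it too).
def Pre_construir_parametros (lista : List String) : Prop := ")" ∈ lista
instance (lista : List String) : Decidable (Pre_construir_parametros lista) := by unfold Pre_construir_parametros; infer_instance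
def pvWitness_construir_parametros : List String := ["a", ",", "b", ")"]

def Spec_construir_parametros (lista : List String) (out : List String × Int) : Prop := out = construir_parametros_alt lista
instance (lista : List String) (out : List String × Int) : Decidable (Spec_construir_parametros lista out) := by unfold Spec_construir_parametros; infer_instance

-- ===== CLAIM (what is proved, stated in full; the proofs are below) =====
def Claim_equal_construir_parametros : Prop := ∀ (lista : List String), Dom_construir_parametros lista → Pre_construir_parametros lista → Spec_construir_parametros lista (construir_parametros lista)

-- ===== LEMMAS AND PROOFS =====
theorem pvFindClose_nonneg (l : List String) : 0 ≤ pvFindClose l := by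
  induction l with
  | nil => simp [pvFindClose]
  | cons x xs ih =>
    simp only [pvFindClose]
    split
    · exact le_refl 0
    · omega

theorem pvALoop_eq (l : List String) (h : ")" ∈ l) :
    pvALoop l = ((l.take (pvFindClose l).toNat).filter (fun x => x ≠ ","), pvFindClose l) := by
  induction l with
  | nil => cases h
  | cons x xs ih =>
    by_cases hx : x = ")"
    · simp [pvALoop, pvFindClose, hx]
    · have hxs : ")" ∈ xs := by
        cases h with
        | head => exact absurd rfl hx
        | tail _ h' => exact h'
      have hnn := pvFindClose_nonneg xs
      have htn : (pvFindClose xs + 1).toNat = (pvFindClose xs).toNat + 1 := by omega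
      simp only [pvALoop, pvFindClose, if_neg hx, ih hxs, htn, List.take_succ_cons,
        List.filter_cons]
      by_cases hc : x = ","
      · simp [hc]
      · simp [hc]

-- ===== VERDICT (by name: the statement is the Claim_ definition above) =====
theorem construir_parametros_spec : Claim_equal_construir_parametros := by
  intro lista _ hpre
  unfold Spec_construir_parametros construir_parametros construir_parametros_alt
  exact pvALoop_eq lista hpre
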